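-- pv_equiv track=rewrite | github.com/KingoSolo/cropguard-ml | test.py | count_grades
-- ===== SOURCE A (Python) =====
-- def count_grades(grades):
--     grade = {}
--     count = 0
--
--     for grade_letter in grades:
--         if grade_letter not in grade:
--             grade[grade_letter] = 1
--         else:
--             grade[grade_letter] += 1
--         count += 1
--     return grade
-- ===== SOURCE B (Python) =====
-- def count_grades(grades):
--     grades = list(grades)
--     return {g: grades.count(g) for g in dict.fromkeys(grades)}
-- ===== Notes on version B (the rewrite author's own statement) =====
-- stated objective: alternative
-- what changed: Replaces the single accumulating dict-update pass by first collecting the distinct grades in first-occurrence order (dict.fromkeys) and then counting each with a separate grades.count scan.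
import Mathlib
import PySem

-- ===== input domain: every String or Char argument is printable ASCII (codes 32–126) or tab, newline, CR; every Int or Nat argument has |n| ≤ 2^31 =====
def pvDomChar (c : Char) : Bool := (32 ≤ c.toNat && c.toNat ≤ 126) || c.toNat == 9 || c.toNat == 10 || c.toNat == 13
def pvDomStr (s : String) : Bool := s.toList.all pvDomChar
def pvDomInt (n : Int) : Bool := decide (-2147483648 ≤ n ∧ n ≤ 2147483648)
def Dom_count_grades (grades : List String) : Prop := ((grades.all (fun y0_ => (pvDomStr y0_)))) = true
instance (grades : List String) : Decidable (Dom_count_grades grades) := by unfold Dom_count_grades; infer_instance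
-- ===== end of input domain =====

-- ===== PORT A =====
-- Header: B replaces A's single accumulating dict pass by dedup-then-count-per-key (alternative decomposition, same results).
def count_grades (grades : List String) : List (String × Int) :=
  ((grades.foldl
      (fun (st : PySem.Dict String Int × Int) grade_letter =>
        (if st.1.contains grade_letter = false then st.1.insert grade_letter 1
         else st.1.modify grade_letter 0 (· + 1),
         st.2 + 1))
      (PySem.Dict.empty, 0)).1).items

-- ===== PORT B =====
def count_grades_alt (grades : List String) : List (String × Int) :=
  (PySem.List.dedup grades).map (fun g => (g, (PySem.List.count grades g : Int)))

-- ===== PRECONDITION & SPEC =====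
def Spec_count_grades (grades : List String) (out : List (String × Int)) : Prop := out = count_grades_alt grades
instance (grades : List String) (out : List (String × Int)) : Decidable (Spec_count_grades grades out) := by unfold Spec_count_grades; infer_instance

-- ===== CLAIM (what is proved, stated in full; the proofs are below) =====
def Claim_equal_count_grades : Prop := ∀ (grades : List String), Dom_count_grades grades → Spec_count_grades grades (count_grades grades)

-- ===== LEMMAS AND PROOFS =====

-- ===== VERDICT (by name: the statement is the Claim_ definition above) =====
-- A's loop body equals Counter's step: inserting 1 for an absent key is modify with default 0.
theorem step_eq_modify (d : PySem.Dict String Int) (g : String) :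
    (if d.contains g = false then d.insert g 1 else d.modify g 0 (· + 1)) = d.modify g 0 (· + 1) := by
  by_cases h : d.contains g = false
  · simp only [h, if_true]
    cases d with
    | mk items =>
      simp only [PySem.Dict.contains] at h
      have hf : (List.find? (fun p => (p.1 == g)) items) = none :=
        List.find?_eq_none.2 (by simpa [List.any_eq_false] using h)
      simp [PySem.Dict.insert, PySem.Dict.modify, PySem.Dict.getD, PySem.Dict.get?, h, hf]
  · simp [h]

-- the pair-state fold projects to the dict-only fold
theorem fold_fst (grades : List String) (d : PySem.Dict String Int) (c : Int) :
    (grades.foldl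
      (fun (st : PySem.Dict String Int × Int) g =>
        (if st.1.contains g = false then st.1.insert g 1 else st.1.modify g 0 (· + 1), st.2 + 1))
      (d, c)).1
    = grades.foldl (fun d g => d.modify g 0 (· + 1)) d := by
  induction grades generalizing d c with
  | nil => rfl
  | cons x xs ih => rw [List.foldl_cons, List.foldl_cons, step_eq_modify]; exact ih _ _

theorem count_grades_spec : Claim_equal_count_grades := by
  intro grades _
  show count_grades grades = count_grades_alt grades
  unfold count_grades count_grades_alt
  rw [fold_fst, ← PySem.Dict.counter_eq_foldl, PySem.Dict.items_counter]
  simp [PySem.List.dedup_eq_ofList, PySem.List.count_eq]
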